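-- pv_equiv track=rewrite | github.com/MoMoWan/FalconCloud | jedilib/remote_task.py | Parse
-- ===== SOURCE A (Python) =====
-- def Parse(xmlRetData):
--     """
--     Parse response XML data and returns a list of values
--     """
--     tokenStart = "<Response>"
--     tokenEnd = "</R"
--     indexStart = 0
--     indexEnd = 0
--     data = []
--     while True:
--         indexStart = xmlRetData.find(tokenStart,indexEnd)
--         if indexStart == -1:
--             break
--         indexEnd = xmlRetData.find(tokenEnd,indexStart)
--         if indexEnd == -1:
--             break
--
--         if (indexStart + len(tokenStart)) == indexEnd:
--             data.append("")
--         else: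
--             data.append(xmlRetData[indexStart + len(tokenStart):indexEnd])
--
--     return data
-- ===== SOURCE B (Python) =====
-- import re
--
-- def Parse(xmlRetData):
--     """
--     Parse response XML data and returns a list of values
--     """
--     return re.findall(r'<Response>(.*?)</R', xmlRetData, re.DOTALL)
-- ===== Notes on version B (the rewrite author's own statement) =====
-- stated objective: idiomatic
-- what changed: The manual while-loop with two str.find scans and index bookkeeping is replaced by a single non-greedy regular expression: re.findall(r'<Response>(.*?)</R', xmlRetData, re.DOTALL) returns exactly the captured groups in order.
import Mathlib
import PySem

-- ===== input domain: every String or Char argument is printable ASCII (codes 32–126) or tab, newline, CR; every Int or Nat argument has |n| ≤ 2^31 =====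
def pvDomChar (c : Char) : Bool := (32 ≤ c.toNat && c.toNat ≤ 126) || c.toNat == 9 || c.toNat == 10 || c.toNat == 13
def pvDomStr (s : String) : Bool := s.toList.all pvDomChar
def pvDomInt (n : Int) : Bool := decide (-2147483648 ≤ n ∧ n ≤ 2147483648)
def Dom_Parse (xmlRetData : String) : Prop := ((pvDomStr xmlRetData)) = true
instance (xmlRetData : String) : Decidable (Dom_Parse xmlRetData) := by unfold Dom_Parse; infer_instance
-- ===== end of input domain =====

-- B replaces A's manual while/find loop by the single regex re.findall(r'<Response>(.*?)</R', s, re.DOTALL) (idiomatic; same value everywhere).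

-- ===== PORT A =====
-- Transliteration of A's `while True` loop.  Python's loop has no structural bound, so the Lean
-- loop carries a fuel counter; `Parse` starts it at len(s)+1, which the proofs below show is never
-- exhausted (every iteration that continues advances indexEnd by at least 10 positions).
def pvLoopA (xmlRetData : String) (fuel : Nat) (indexEnd : Int) (data : List String) : List String :=
  match fuel with
  | 0 => data
  | fuel + 1 =>
    let indexStart := PySem.Str.findFrom xmlRetData "<Response>" indexEnd
    if indexStart = -1 then data
    else
      let indexEnd' := PySem.Str.findFrom xmlRetData "</R" indexStart
      if indexEnd' = -1 then data
      else if indexStart + PySem.Str.len "<Response>" = indexEnd' then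
        pvLoopA xmlRetData fuel indexEnd' (data ++ [""])
      else
        pvLoopA xmlRetData fuel indexEnd'
          (data ++ [PySem.Str.slice xmlRetData (some (indexStart + PySem.Str.len "<Response>")) (some indexEnd')])

def Parse (xmlRetData : String) : List String :=
  pvLoopA xmlRetData (xmlRetData.toList.length + 1) 0 []

-- ===== PORT B =====
-- The two literal pieces of the regex  <Response>(.*?)</R  .
def pvTokS : List Char := ['<', 'R', 'e', 's', 'p', 'o', 'n', 's', 'e', '>']
def pvTokE : List Char := ['<', '/', 'R']

-- Hand port of re.findall(r'<Response>(.*?)</R', s, re.DOTALL) — PySem has no regex engine.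
-- Exact for this fixed pattern: findall scans left to right; at a position where the literal
-- '<Response>' matches, the lazy '(.*?)' (DOTALL) makes the match end at the FIRST following
-- '</R' (if none, the attempt at this position fails and scanning moves one char right);
-- findall records the captured group and resumes after the consumed '</R'.
def pvScan (t : List Char) : List String :=
  match t with
  | [] => []
  | c :: r =>
    if pvTokS <+: (c :: r) then
      let u := (c :: r).drop 10
      let e := PySem.Chars.find u pvTokE
      if e = -1 then pvScan r
      else String.ofList (u.take e.toNat) :: pvScan (u.drop (e.toNat + 3))
    else pvScan r
termination_by t.length
decreasing_by all_goals simp [List.length_drop]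

def Parse_alt (xmlRetData : String) : List String :=
  pvScan xmlRetData.toList

-- ===== PRECONDITION & SPEC =====
def Spec_Parse (xmlRetData : String) (out : List String) : Prop := out = Parse_alt xmlRetData
instance (xmlRetData : String) (out : List String) : Decidable (Spec_Parse xmlRetData out) := by unfold Spec_Parse; infer_instance

-- ===== CLAIM (what is proved, stated in full; the proofs are below) =====
def Claim_equal_Parse : Prop := ∀ (xmlRetData : String), Dom_Parse xmlRetData → Spec_Parse xmlRetData (Parse xmlRetData)

-- ===== LEMMAS AND PROOFS =====

lemma pvScan_nil : pvScan [] = [] := by rw [pvScan]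

lemma pvTokS_toList : "<Response>".toList = pvTokS := by decide
lemma pvTokE_toList : "</R".toList = pvTokE := by decide

-- If '<Response>' matches at no position < n, the scanner's first n single-char steps are skips.
lemma pvScan_skip : ∀ (n : Nat) (t : List Char), (∀ j, j < n → ¬ pvTokS <+: t.drop j) →
    pvScan t = pvScan (t.drop n) := by
  intro n
  induction n with
  | zero => intro t _; simp
  | succ n ih =>
    intro t h
    cases t with
    | nil => simp
    | cons c r =>
      have h0 : ¬ pvTokS <+: (c :: r) := by simpa using h 0 (Nat.succ_pos n)
      have hstep : pvScan (c :: r) = pvScan r := by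
        rw [pvScan]; simp [h0]
      rw [hstep, ih r (fun j hj => by simpa using h (j + 1) (by omega))]
      simp

-- If '<Response>' occurs nowhere, the scanner finds nothing.
lemma pvScan_no_start (t : List Char) (h : ¬ pvTokS <:+: t) : pvScan t = [] := by
  have hall : ∀ j, ¬ pvTokS <+: t.drop j := by
    intro j hp
    exact h ((PySem.Chars.isIn_iff_infix _ _).mp
      ((PySem.Chars.exists_prefix_drop_iff_isIn _ _).mp ⟨j, hp⟩))
  rw [pvScan_skip t.length t (fun j _ => hall j), List.drop_length, pvScan_nil]

-- If '</R' occurs nowhere, no match can ever complete: the scanner returns [].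
lemma pvScan_no_end : ∀ (t : List Char), ¬ pvTokE <:+: t → pvScan t = [] := by
  intro t
  induction t with
  | nil => intro _; exact pvScan_nil
  | cons c r ih =>
    intro h
    have hr : ¬ pvTokE <:+: r := fun hi => h (hi.trans (List.suffix_cons c r).isInfix)
    by_cases hp : pvTokS <+: (c :: r)
    · have hu : ¬ pvTokE <:+: (c :: r).drop 10 :=
        fun hi => h (hi.trans (List.drop_suffix 10 (c :: r)).isInfix)
      have hf : PySem.Chars.find ((c :: r).drop 10) pvTokE = -1 :=
        (PySem.Chars.find_eq_neg_one_iff _ _).mpr hu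
      have hf9 : PySem.Chars.find (r.drop 9) pvTokE = -1 := by simpa using hf
      rw [pvScan]; simp [hp, hf9, ih hr]
    · rw [pvScan]; simp [hp, ih hr]

-- find over a region with no match in the first n positions = n + find on the rest.
lemma pvFind_shift (t sub : List Char) (n : Nat)
    (h : ∀ j, j < n → ¬ sub <+: t.drop j) :
    PySem.Chars.find t sub =
      if PySem.Chars.find (t.drop n) sub = -1 then -1
      else ↑n + PySem.Chars.find (t.drop n) sub := by
  by_cases hd : PySem.Chars.find (t.drop n) sub = -1
  · simp only [hd]
    apply (PySem.Chars.find_eq_neg_one_iff _ _).mpr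
    intro hi
    obtain ⟨j, hj⟩ := (PySem.Chars.exists_prefix_drop_iff_isIn sub t).mpr
      ((PySem.Chars.isIn_iff_infix _ _).mpr hi)
    rcases lt_or_ge j n with hjn | hjn
    · exact h j hjn hj
    · have : sub <+: (t.drop n).drop (j - n) := by
        rw [List.drop_drop, show n + (j - n) = j from by omega]; exact hj
      exact ((PySem.Chars.find_eq_neg_one_iff _ _).mp hd)
        ((PySem.Chars.isIn_iff_infix _ _).mp
          ((PySem.Chars.exists_prefix_drop_iff_isIn _ _).mp ⟨j - n, this⟩))
  · rw [if_neg hd]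
    have he0 : 0 ≤ PySem.Chars.find (t.drop n) sub := by
      have := PySem.Chars.neg_one_le_find (t.drop n) sub; omega
    obtain ⟨hdpre, hdmin⟩ := PySem.Chars.find_spec he0
    set e := (PySem.Chars.find (t.drop n) sub).toNat with hedef
    have hpre : sub <+: t.drop (n + e) := by rwa [List.drop_drop] at hdpre
    have hinf : sub <:+: t :=
      (PySem.Chars.isIn_iff_infix _ _).mp
        ((PySem.Chars.exists_prefix_drop_iff_isIn _ _).mp ⟨n + e, hpre⟩)
    have hf0 : 0 ≤ PySem.Chars.find t sub := (PySem.Chars.find_nonneg_iff _ _).mpr hinf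
    obtain ⟨htpre, htmin⟩ := PySem.Chars.find_spec hf0
    set f := (PySem.Chars.find t sub).toNat with hfdef
    have h1 : n ≤ f := by
      by_contra hc
      exact h f (by omega) htpre
    have h2 : ¬ (f - n < e) := by
      intro hc
      have : sub <+: (t.drop n).drop (f - n) := by
        rw [List.drop_drop, show n + (f - n) = f from by omega]; exact htpre
      exact hdmin (f - n) hc this
    have h3 : ¬ (n + e < f) := fun hc => htmin (n + e) hc hpre
    clear_value e f
    omega

-- '</R' does not match at any of the 10 positions covered by a '<Response>' token.
lemma pv_not_tokE_early (u : List Char) : ∀ j, j < 10 → ¬ pvTokE <+: (pvTokS ++ u).drop j := by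
  intro j hj
  interval_cases j <;> simp [pvTokS, pvTokE, List.cons_prefix_cons]

-- '<Response>' does not match at any of the 3 positions covered by a '</R' token.
lemma pv_not_tokS_early (u : List Char) : ∀ j, j < 3 → ¬ pvTokS <+: (pvTokE ++ u).drop j := by
  intro j hj
  interval_cases j <;> simp [pvTokS, pvTokE, List.cons_prefix_cons]

lemma pvLen_tokS : PySem.Str.len "<Response>" = 10 := by decide

-- One scanner step at an actual '<Response>' occurrence with a following '</R' at offset e in u'.
lemma pvScan_cons_eq (u' : List Char) (he : PySem.Chars.find u' pvTokE ≠ -1) :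
    pvScan (pvTokS ++ u') =
      String.ofList (u'.take (PySem.Chars.find u' pvTokE).toNat) ::
        pvScan (u'.drop ((PySem.Chars.find u' pvTokE).toNat + 3)) := by
  have hp : pvTokS <+: pvTokS ++ u' := List.prefix_append _ _
  have hd : (pvTokS ++ u').drop 10 = u' := by
    have : pvTokS.length = 10 := by decide
    rw [← this, List.drop_left]
  rw [show pvTokS ++ u' = '<' :: (['R','e','s','p','o','n','s','e','>'] ++ u') from rfl]
  rw [pvScan]
  rw [show '<' :: (['R','e','s','p','o','n','s','e','>'] ++ u') = pvTokS ++ u' from rfl] at *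
  simp only [hp, if_pos, hd]
  simp [he]

-- Main invariant: from any reached state (indexEnd = k, accumulator data), A's loop appends
-- exactly what the scanner extracts from the rest of the string.
lemma pvLoopA_eq (s : String) : ∀ (fuel : Nat) (k : Nat) (data : List String),
    k ≤ s.toList.length → s.toList.length - k < fuel →
    pvLoopA s fuel (↑k) data = data ++ pvScan (s.toList.drop k) := by
  intro fuel
  induction fuel with
  | zero => intro k data _ hf; omega
  | succ fuel ih =>
    intro k data hk hf
    rw [pvLoopA]
    simp only [PySem.Str.findFrom_eq, pvTokS_toList, pvTokE_toList]
    rw [PySem.Chars.findFrom_natCast _ _ k hk]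
    set t := s.toList.drop k with ht
    by_cases h1 : PySem.Chars.find t pvTokS = -1
    · rw [pvScan_no_start t ((PySem.Chars.find_eq_neg_one_iff _ _).mp h1)]
      simp [h1]
    · have hi0 : 0 ≤ PySem.Chars.find t pvTokS := by
        have := PySem.Chars.neg_one_le_find t pvTokS; omega
      set iN := (PySem.Chars.find t pvTokS).toNat with hiNdef
      have hfi : PySem.Chars.find t pvTokS = (iN : Int) := (Int.toNat_of_nonneg hi0).symm
      obtain ⟨hspre, hsmin⟩ := PySem.Chars.find_spec hi0
      rw [← hiNdef] at hspre hsmin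
      obtain ⟨u', hu⟩ := hspre
      have hiL : iN ≤ t.length := by
        have := PySem.Chars.find_le_length t pvTokS; omega
      have htlen : t.length = s.toList.length - k := by rw [ht, List.length_drop]
      have hulen : t.length = iN + 10 + u'.length := by
        have := congrArg List.length hu
        simp [pvTokS, List.length_drop] at this
        omega
      have hdropkiN : s.toList.drop (k + iN) = pvTokS ++ u' := by
        rw [hu, ht, List.drop_drop]
      have hkiN : k + iN ≤ s.toList.length := by omega
      have hshift : PySem.Chars.find (pvTokS ++ u') pvTokE =
          if PySem.Chars.find u' pvTokE = -1 then -1 else ↑(10 : Nat) + PySem.Chars.find u' pvTokE := by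
        have := pvFind_shift (pvTokS ++ u') pvTokE 10 (pv_not_tokE_early u')
        rwa [show (pvTokS ++ u').drop 10 = u' from by
          rw [show (10:Nat) = pvTokS.length from by decide, List.drop_left]] at this
      have hscan : pvScan t = pvScan (pvTokS ++ u') := by
        rw [pvScan_skip iN t hsmin, hu]
      simp only [hfi, pvLen_tokS]
      have hc1 : ¬((k : Int) + (iN : Int) = -1) := by omega
      simp only [if_neg (show ¬((iN : Int) = -1) from by omega)]
      simp only [if_neg hc1]
      by_cases h3 : PySem.Chars.find u' pvTokE = -1
      · have hE : PySem.Chars.find (pvTokS ++ u') pvTokE = -1 := by rw [hshift]; simp [h3]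
        have hEnd : PySem.Chars.findFrom s.toList pvTokE ((k : Int) + (iN : Int)) = -1 := by
          rw [show ((k:Int) + (iN:Int)) = ((k + iN : Nat) : Int) from by push_cast; ring,
            PySem.Chars.findFrom_natCast _ _ (k + iN) hkiN, hdropkiN, hE]
          simp
        rw [hEnd, if_pos rfl, hscan,
          pvScan_no_end _ ((PySem.Chars.find_eq_neg_one_iff _ _).mp hE)]
        simp
      · have he0 : 0 ≤ PySem.Chars.find u' pvTokE := by
          have := PySem.Chars.neg_one_le_find u' pvTokE; omega
        set eN := (PySem.Chars.find u' pvTokE).toNat with heNdef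
        have hfe : PySem.Chars.find u' pvTokE = (eN : Int) := (Int.toNat_of_nonneg he0).symm
        have heL : eN ≤ u'.length := by
          have := PySem.Chars.find_le_length u' pvTokE; omega
        have hE : PySem.Chars.find (pvTokS ++ u') pvTokE = ((10 + eN : Nat) : Int) := by
          rw [hshift, if_neg h3, hfe]; push_cast; ring
        obtain ⟨hepre, _⟩ := PySem.Chars.find_spec he0
        rw [← heNdef] at hepre
        obtain ⟨w, hw⟩ := hepre
        set k' := k + iN + 10 + eN with hk'def
        have hk'L : k' ≤ s.toList.length := by omega
        have hEnd : PySem.Chars.findFrom s.toList pvTokE ((k : Int) + (iN : Int)) = ((k' : Nat) : Int) := by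
          rw [show ((k:Int) + (iN:Int)) = ((k + iN : Nat) : Int) from by push_cast; ring,
            PySem.Chars.findFrom_natCast _ _ (k + iN) hkiN, hdropkiN, hE,
            if_neg (by omega : ¬((10 + eN : Nat) : Int) = -1)]
          push_cast; omega
        rw [hEnd, if_neg (by omega : ¬((k' : Nat) : Int) = -1)]
        -- where A's next iteration resumes vs where the scanner resumes
        have hdropk' : s.toList.drop k' = u'.drop eN := by
          rw [show k' = (k + iN) + (10 + eN) from by omega, ← List.drop_drop, hdropkiN,
            show (10 + eN) = pvTokS.length + eN from by simp [pvTokS], ← List.drop_drop,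
            List.drop_left]
        have hw3 : (pvTokE ++ w).drop 3 = w := by
          rw [show (3:Nat) = pvTokE.length from by decide, List.drop_left]
        have hscan_next : pvScan (s.toList.drop k') = pvScan (u'.drop (eN + 3)) := by
          rw [hdropk', ← hw, pvScan_skip 3 _ (pv_not_tokS_early w), hw3,
            show u'.drop (eN + 3) = w from by
              rw [← List.drop_drop, ← hw, hw3]]
        have hconsq : pvScan (pvTokS ++ u') = String.ofList (u'.take eN) :: pvScan (u'.drop (eN + 3)) := by
          have := pvScan_cons_eq u' h3
          rwa [← heNdef] at this
        have hdropu : s.toList.drop (k + iN + 10) = u' := by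
          rw [show k + iN + 10 = (k + iN) + 10 from rfl, ← List.drop_drop, hdropkiN,
            show (10:Nat) = pvTokS.length from by decide, List.drop_left]
        have hcap : PySem.Str.slice s (some ((k : Int) + (iN : Int) + 10)) (some ((k' : Nat) : Int)) =
            String.ofList (u'.take eN) := by
          apply String.toList_inj.mp
          rw [PySem.Str.toList_slice, PySem.Chars.slice_eq_listSlice,
            show ((k:Int) + (iN:Int) + 10) = ((k + iN + 10 : Nat) : Int) from by push_cast; ring,
            PySem.List.slice_toNat _ (by omega) (by omega)]
          simp only [Int.toNat_natCast, hdropu, String.toList_ofList]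
          rw [show k' - (k + iN + 10) = eN from by omega]
        rw [hscan, hconsq, ← hscan_next]
        by_cases heN : eN = 0
        · rw [if_pos (by omega)]
          rw [ih k' (data ++ [""]) hk'L (by omega)]
          have h0 : String.ofList (u'.take eN) = "" := by rw [heN]; simp
          simp [h0]
        · rw [if_neg (by omega), hcap,
            ih k' (data ++ [String.ofList (u'.take eN)]) hk'L (by omega)]
          simp

-- ===== VERDICT (by name: the statement is the Claim_ definition above) =====
theorem Parse_spec : Claim_equal_Parse := by
  intro s _
  unfold Spec_Parse Parse Parse_alt
  have := pvLoopA_eq s (s.toList.length + 1) 0 [] (by omega) (by omega)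
  simpa using this
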